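-- pv_equiv track=rewrite | github.com/ederheisler/agent-skills | src/utils.py | _extract_frontmatter_lines
-- ===== SOURCE A (Python) =====
-- def _extract_frontmatter_lines(content: str) -> list[str]:
--     """Extract lines between --- delimiters"""
--     lines = content.split("\n")
--     frontmatter_lines = []
--     in_frontmatter = False
--
--     for line in lines:
--         if line.strip() == "---":
--             if not in_frontmatter:
--                 in_frontmatter = True
--             else:
--                 break
--             continue
--         if in_frontmatter:
--             frontmatter_lines.append(line)
--
--     return frontmatter_lines
-- ===== SOURCE B (Python) =====
-- def _extract_frontmatter_lines(content: str) -> list[str]: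
--     """Extract lines between --- delimiters (locate-then-slice)."""
--     lines = content.split("\n")
--     delims = [i for i, l in enumerate(lines) if l.strip() == "---"]
--     if not delims:
--         return []
--     start = delims[0] + 1
--     end = delims[1] if len(delims) > 1 else len(lines)
--     return lines[start:end]
-- ===== Notes on version B (the rewrite author's own statement) =====
-- stated objective: simpler
-- what changed: Replaces A's stateful flag/break accumulation loop with a locate-then-slice decomposition: compute the list of delimiter-line indices once, then slice between the first delimiter and the second one (or the end).
import Mathlib
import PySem

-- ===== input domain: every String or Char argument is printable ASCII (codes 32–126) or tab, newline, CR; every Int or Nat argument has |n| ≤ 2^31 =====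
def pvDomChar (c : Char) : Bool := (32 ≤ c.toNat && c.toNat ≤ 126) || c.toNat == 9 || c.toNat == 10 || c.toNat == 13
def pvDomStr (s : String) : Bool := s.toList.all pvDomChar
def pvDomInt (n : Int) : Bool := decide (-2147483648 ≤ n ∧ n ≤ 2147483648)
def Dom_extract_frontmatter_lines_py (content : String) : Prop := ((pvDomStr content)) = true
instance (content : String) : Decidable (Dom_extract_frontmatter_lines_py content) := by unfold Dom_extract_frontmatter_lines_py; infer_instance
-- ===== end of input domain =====

-- B replaces A's stateful flag/break loop by locate-then-slice: find the delimiter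
-- indices once, then slice between the first two (objective: simpler decomposition).

-- ===== PORT A =====
-- the for-loop of A, with state (frontmatter_lines accumulator, in_frontmatter flag); 'break' returns acc
def pvLoopA : List String → List String → Bool → List String
  | [], acc, _ => acc
  | l :: rest, acc, inf =>
    if PySem.Str.strip l == "---" then
      (if inf = false then pvLoopA rest acc true else acc)
    else
      (if inf then pvLoopA rest (acc ++ [l]) inf else pvLoopA rest acc inf)

def extract_frontmatter_lines_py (content : String) : List String :=
  let lines := (PySem.Str.split? content "\n").getD []
  pvLoopA lines [] false

-- ===== PORT B =====
def extract_frontmatter_lines_py_alt (content : String) : List String :=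
  let lines := (PySem.Str.split? content "\n").getD []
  let delims := (PySem.List.enumerate lines).filterMap
    (fun p => if PySem.Str.strip p.2 == "---" then some p.1 else none)
  match delims with
  | [] => []
  | [i] => PySem.List.slice lines (some (i + 1)) (some (lines.length : Int))
  | i :: j :: _ => PySem.List.slice lines (some (i + 1)) (some j)

-- ===== PRECONDITION & SPEC =====
def Spec_extract_frontmatter_lines_py (content : String) (out : List String) : Prop := out = extract_frontmatter_lines_py_alt content
instance (content : String) (out : List String) : Decidable (Spec_extract_frontmatter_lines_py content out) := by unfold Spec_extract_frontmatter_lines_py; infer_instance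

-- ===== CLAIM (what is proved, stated in full; the proofs are below) =====
def Claim_equal_extract_frontmatter_lines_py : Prop := ∀ (content : String), Dom_extract_frontmatter_lines_py content → Spec_extract_frontmatter_lines_py content (extract_frontmatter_lines_py content)

-- ===== LEMMAS AND PROOFS =====

-- proof-only helpers
def pvIsDelim (l : String) : Bool := PySem.Str.strip l == "---"

-- the Nat indices of the delimiter lines, structurally
def pvIdxs : List String → List Nat
  | [] => []
  | l :: r => if pvIsDelim l then 0 :: (pvIdxs r).map (· + 1) else (pvIdxs r).map (· + 1)

theorem pvLoopA_true (q : List String) (acc : List String) :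
    pvLoopA q acc true = acc ++ q.takeWhile (fun l => !pvIsDelim l) := by
  induction q generalizing acc with
  | nil => simp [pvLoopA]
  | cons l r ih =>
    by_cases h : pvIsDelim l
    · simp [pvLoopA, pvIsDelim] at h ⊢; simp [h]
    · simp only [pvIsDelim] at h
      simp [pvLoopA, h, ih, pvIsDelim]

theorem pvLoopA_false (q : List String) (acc : List String) :
    pvLoopA q acc false =
      match q.dropWhile (fun l => !pvIsDelim l) with
      | [] => acc
      | _ :: rest => pvLoopA rest acc true := by
  induction q with
  | nil => simp [pvLoopA]
  | cons l r ih =>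
    by_cases h : pvIsDelim l
    · simp only [pvIsDelim] at h
      simp [pvLoopA, h, pvIsDelim]
    · simp only [pvIsDelim] at h
      simp [pvLoopA, h, ih, pvIsDelim]

-- B's delimiter list is pvIdxs, shifted by the enumerate start
theorem pvDelims_eq (q : List String) (s : Nat) :
    (PySem.List.enumerate q (s : Int)).filterMap
        (fun p => if PySem.Str.strip p.2 == "---" then some p.1 else none)
      = (pvIdxs q).map (fun k => ((s + k : Nat) : Int)) := by
  induction q generalizing s with
  | nil => simp [PySem.List.enumerate_nil, pvIdxs]
  | cons l r ih =>
    have hs : ((s : Int) + 1) = ((s + 1 : Nat) : Int) := by push_cast; ring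
    by_cases h : pvIsDelim l
    · simp only [pvIsDelim] at h
      simp only [PySem.List.enumerate_cons, List.filterMap_cons, h, if_true, pvIdxs, pvIsDelim,
        hs, ih (s + 1), List.map_cons, List.map_map, List.cons.injEq]
      refine ⟨by push_cast; ring, ?_⟩
      apply List.map_congr_left; intro k _; simp; ring
    · simp only [pvIsDelim] at h
      rw [PySem.List.enumerate_cons, List.filterMap_cons]
      simp only [h, Bool.false_eq_true, if_false, pvIdxs, pvIsDelim, hs, ih (s + 1), List.map_map]
      apply List.map_congr_left; intro k _; simp; ring

theorem pvIdxs_nil_iff (q : List String) :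
    pvIdxs q = [] ↔ ∀ x ∈ q, pvIsDelim x = false := by
  induction q with
  | nil => simp [pvIdxs]
  | cons l r ih =>
    by_cases h : pvIsDelim l <;> simp [pvIdxs, h, ih]

theorem pvIdxs_decomp (p : List String) (d : String) (q : List String)
    (hd : pvIsDelim d = true) :
    (∀ x ∈ p, pvIsDelim x = false) →
    pvIdxs (p ++ d :: q) = p.length :: (pvIdxs q).map (· + (p.length + 1)) := by
  induction p with
  | nil =>
    intro _; simp [pvIdxs, hd]
  | cons l p' ih =>
    intro hp
    have hl : pvIsDelim l = false := hp l (by simp)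
    have h2 := ih (fun x hx => hp x (by simp [hx]))
    simp only [List.cons_append, pvIdxs, hl, Bool.false_eq_true, if_false, h2,
      List.map_cons, List.map_map, List.length_cons, List.cons.injEq]
    refine ⟨trivial, ?_⟩
    apply List.map_congr_left; intro k _; simp; omega

theorem pv_take_takeWhile {α : Type} (l : List α) (p : α → Bool) :
    l.take (l.takeWhile p).length = l.takeWhile p := by
  induction l with
  | nil => simp
  | cons x xs ih => by_cases h : p x <;> simp [h, ih]

theorem pv_takeWhile_eq_self {α : Type} (l : List α) (p : α → Bool)
    (h : ∀ x ∈ l, p x = true) : l.takeWhile p = l := by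
  induction l with
  | nil => rfl
  | cons x xs ih => simp [h x (by simp), ih (fun y hy => h y (by simp [hy]))]

theorem pvIdxs_head (q : List String) (k : Nat) (t : List Nat)
    (h : pvIdxs q = k :: t) : k = (q.takeWhile (fun l => !pvIsDelim l)).length := by
  induction q generalizing k t with
  | nil => simp [pvIdxs] at h
  | cons x xs ih =>
    by_cases hx : pvIsDelim x
    · simp [pvIdxs, hx] at h; simp [hx, ← h.1]
    · simp only [pvIdxs, hx, Bool.false_eq_true, if_false] at h
      rcases hxs : pvIdxs xs with _ | ⟨k', t'⟩
      · rw [hxs] at h; simp at h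
      · rw [hxs] at h; simp at h
        simp [hx, ← h.1, ih k' t' hxs]

-- the common characterisation, proved equal to both ports' cores
theorem pv_core_eq (lines : List String) :
    pvLoopA lines [] false =
      match pvIdxs lines with
      | [] => []
      | [i] => PySem.List.slice lines (some ((i : Int) + 1)) (some (lines.length : Int))
      | i :: j :: _ => PySem.List.slice lines (some ((i : Int) + 1)) (some (j : Int)) := by
  rw [pvLoopA_false]
  rcases hdw : lines.dropWhile (fun l => !pvIsDelim l) with _ | ⟨d, rest⟩
  · -- no delimiter at all
    have hall : ∀ x ∈ lines, pvIsDelim x = false := by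
      intro x hx
      by_contra hcon
      have hx' : x ∈ lines.takeWhile (fun l => !pvIsDelim l) := by
        rw [← List.takeWhile_append_dropWhile (p := fun l => !pvIsDelim l) (l := lines), hdw] at hx
        simpa using hx
      have := List.mem_takeWhile_imp hx'
      simp at this; exact hcon (by simp [this])
    rw [(pvIdxs_nil_iff lines).mpr hall]
  · -- lines = tw ++ d :: rest, d is the first delimiter
    have hsplit : lines.takeWhile (fun l => !pvIsDelim l) ++ d :: rest = lines := by
      rw [← hdw, List.takeWhile_append_dropWhile]
    set tw := lines.takeWhile (fun l => !pvIsDelim l) with htw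
    have htwall : ∀ x ∈ tw, pvIsDelim x = false := by
      intro x hx; have := List.mem_takeWhile_imp hx; simpa using this
    have hd : pvIsDelim d = true := by
      have := List.head_dropWhile_not (fun l => !pvIsDelim l) (l := lines) (by simp [hdw])
      simp [hdw] at this; exact this
    have hidx : pvIdxs lines = tw.length :: (pvIdxs rest).map (· + (tw.length + 1)) := by
      rw [← hsplit]; exact pvIdxs_decomp tw d rest hd htwall
    rw [hidx]
    change pvLoopA rest [] true = _
    rw [pvLoopA_true]
    have hdrop : lines.drop (tw.length + 1) = rest := by
      rw [← hsplit]
      have : tw ++ d :: rest = (tw ++ [d]) ++ rest := by simp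
      rw [this]
      have hlen : (tw ++ [d]).length = tw.length + 1 := by simp
      rw [← hlen, List.drop_left]
    rcases hri : pvIdxs rest with _ | ⟨k, t⟩
    · -- single delimiter: slice to end = rest, and rest has no delimiter
      have hrall : ∀ x ∈ rest, pvIsDelim x = false := (pvIdxs_nil_iff rest).mp hri
      have hcast : ((tw.length : Int) + 1) = ((tw.length + 1 : Nat) : Int) := by push_cast; ring
      simp only [List.map_nil, List.nil_append, hcast, PySem.List.slice_natCast, hdrop]
      have hlen2 : lines.length = tw.length + 1 + rest.length := by
        rw [← hsplit]; simp; omega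
      rw [hlen2]
      have : tw.length + 1 + rest.length - (tw.length + 1) = rest.length := by omega
      rw [this, List.take_length]
      rw [pv_takeWhile_eq_self rest _ (fun x hx => by simp [hrall x hx])]
    · -- two delimiters: slice tw.length+1 .. k+tw.length+1 = rest.take k = rest.takeWhile
      have hk : k = (rest.takeWhile (fun l => !pvIsDelim l)).length := pvIdxs_head rest k t hri
      have hc1 : ((tw.length : Int) + 1) = ((tw.length + 1 : Nat) : Int) := by push_cast; ring
      have hc2 : ((k + (tw.length + 1) : Nat) : Int) = ((k + tw.length + 1 : Nat) : Int) := by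
        push_cast; ring
      simp only [List.map_cons, hc1, hc2, PySem.List.slice_natCast, hdrop]
      have : k + tw.length + 1 - (tw.length + 1) = k := by omega
      rw [this, hk, pv_take_takeWhile, List.nil_append]

-- ===== VERDICT (by name: the statement is the Claim_ definition above) =====
theorem extract_frontmatter_lines_py_spec : Claim_equal_extract_frontmatter_lines_py := by
  intro content _
  show extract_frontmatter_lines_py content = extract_frontmatter_lines_py_alt content
  simp only [extract_frontmatter_lines_py, extract_frontmatter_lines_py_alt]
  rw [pv_core_eq]
  have h0 : (PySem.List.enumerate ((PySem.Str.split? content "\n").getD []) 0).filterMap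
      (fun p => if PySem.Str.strip p.2 == "---" then some p.1 else none)
      = (pvIdxs ((PySem.Str.split? content "\n").getD [])).map (fun k : Nat => (k : Int)) := by
    have h := pvDelims_eq ((PySem.Str.split? content "\n").getD []) 0
    simp only [Nat.cast_zero, Nat.zero_add] at h
    exact h
  rw [h0]
  generalize pvIdxs ((PySem.Str.split? content "\n").getD []) = zs
  rcases zs with _ | ⟨i, _ | ⟨j, t⟩⟩ <;> simp
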